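-- pv_equiv track=rewrite | github.com/ifesserra-lab/fapes_lib | scripts/dashboard.py | _available_institution_rows
-- ===== SOURCE A (Python) =====
-- from collections.abc import Mapping, Sequence
-- from typing import Any, Final, TypeAlias, cast
--
-- ReportRow: TypeAlias = dict[str, object]
--
-- _UNKNOWN_INSTITUTION = "Sem informacao"
--
-- def filter_rows(rows: Sequence[Mapping[str, object]], query: str) -> list[ReportRow]:
--     """Filter institution rows by name or acronym."""
--
--     normalized_query = query.casefold().strip()
--     if not normalized_query:
--         return [dict(row) for row in rows]
--
--     filtered: list[ReportRow] = []
--     for row in rows: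
--         name = str(row.get("instituicao_nome", "")).casefold()
--         acronym = str(row.get("instituicao_sigla", "")).casefold()
--         if normalized_query in name or normalized_query in acronym:
--             filtered.append(dict(row))
--
--     return filtered
--
-- def _available_institution_rows(
--     rows: Sequence[Mapping[str, object]],
--     include_unknown: bool,
--     query: str,
-- ) -> list[ReportRow]:
--     available_rows = (
--         [dict(row) for row in rows]
--         if include_unknown
--         else _known_institution_rows(rows)
--     )
--     return filter_rows(available_rows, query)
--
-- def _known_institution_rows(
--     rows: Sequence[Mapping[str, object]],
-- ) -> list[ReportRow]:
--     return [dict(row) for row in rows if not _is_unknown_institution(row)]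
--
-- def _is_unknown_institution(row: Mapping[str, object]) -> bool:
--     return (
--         str(row.get("instituicao_nome", "")).strip() == _UNKNOWN_INSTITUTION
--         and str(row.get("instituicao_sigla", "")).strip() == _UNKNOWN_INSTITUTION
--     )
-- ===== SOURCE B (Python) =====
-- _UNKNOWN_INSTITUTION = "Sem informacao"
--
-- def _available_institution_rows(rows, include_unknown, query):
--     """Single fused pass: one guarded predicate per row instead of two
--     sequential filter+copy passes.  Same return value as A."""
--     normalized_query = query.casefold().strip()
--
--     def keep(row):
--         name = str(row.get("instituicao_nome", ""))
--         acronym = str(row.get("instituicao_sigla", ""))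
--         available = include_unknown or not (
--             name.strip() == _UNKNOWN_INSTITUTION
--             and acronym.strip() == _UNKNOWN_INSTITUTION
--         )
--         matches = (
--             not normalized_query
--             or normalized_query in name.casefold()
--             or normalized_query in acronym.casefold()
--         )
--         return available and matches
--
--     return [dict(row) for row in rows if keep(row)]
-- ===== Notes on version B (the rewrite author's own statement) =====
-- stated objective: simpler
-- what changed: Replaces A's two sequential passes (availability filter with copies, then filter_rows' branch-and-append loop over the intermediate list) with one fused pass over rows using a single combined keep predicate and a direct comprehension.
import Mathlib
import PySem

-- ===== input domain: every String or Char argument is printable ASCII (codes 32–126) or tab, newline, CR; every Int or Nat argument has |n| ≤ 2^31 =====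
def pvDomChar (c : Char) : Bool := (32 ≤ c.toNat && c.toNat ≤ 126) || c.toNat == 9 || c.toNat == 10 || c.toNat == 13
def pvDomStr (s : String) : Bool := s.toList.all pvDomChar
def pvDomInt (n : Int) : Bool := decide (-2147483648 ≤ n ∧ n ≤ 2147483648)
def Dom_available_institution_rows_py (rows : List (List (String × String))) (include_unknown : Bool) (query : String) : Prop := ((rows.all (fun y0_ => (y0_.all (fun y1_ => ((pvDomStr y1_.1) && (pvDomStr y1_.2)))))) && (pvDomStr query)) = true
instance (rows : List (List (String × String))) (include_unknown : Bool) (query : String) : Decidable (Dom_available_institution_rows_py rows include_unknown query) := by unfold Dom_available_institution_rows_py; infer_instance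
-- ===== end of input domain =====

-- B fuses A's two sequential filter+copy passes into one pass with a single combined
-- per-row predicate (objective: simpler one-pass decomposition, same asymptotic cost).
-- Rows are dicts (unique keys); dict(row) is the identity copy under the List (String × String) convention.
-- casefold is ported as PySem.Str.lower (exact on the ASCII domain Dom).

-- ===== PORT A =====
def pvRowGet (row : List (String × String)) (k : String) : String :=
  (PySem.Dict.mk row).getD k ""

def pvIsUnknownInstitution (row : List (String × String)) : Bool :=
  PySem.Str.strip (pvRowGet row "instituicao_nome") == "Sem informacao" &&
  PySem.Str.strip (pvRowGet row "instituicao_sigla") == "Sem informacao"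

def pvKnownInstitutionRows (rows : List (List (String × String))) : List (List (String × String)) :=
  rows.filter (fun row => !pvIsUnknownInstitution row)

def pvFilterRows (rows : List (List (String × String))) (query : String) : List (List (String × String)) :=
  let normalized_query := PySem.Str.strip (PySem.Str.lower query)
  if normalized_query = "" then
    rows.map (fun row => row)
  else
    rows.foldl (fun filtered row =>
      if PySem.Str.isIn normalized_query (PySem.Str.lower (pvRowGet row "instituicao_nome")) ||
         PySem.Str.isIn normalized_query (PySem.Str.lower (pvRowGet row "instituicao_sigla")) then
        filtered ++ [row]
      else filtered) []

def available_institution_rows_py (rows : List (List (String × String))) (include_unknown : Bool) (query : String) : List (List (String × String)) :=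
  let available_rows :=
    if include_unknown then rows.map (fun row => row) else pvKnownInstitutionRows rows
  pvFilterRows available_rows query

-- ===== PORT B =====
def pvKeep (include_unknown : Bool) (nq : String) (row : List (String × String)) : Bool :=
  (include_unknown ||
    !(PySem.Str.strip (pvRowGet row "instituicao_nome") == "Sem informacao" &&
      PySem.Str.strip (pvRowGet row "instituicao_sigla") == "Sem informacao")) &&
  (nq == "" ||
    PySem.Str.isIn nq (PySem.Str.lower (pvRowGet row "instituicao_nome")) ||
    PySem.Str.isIn nq (PySem.Str.lower (pvRowGet row "instituicao_sigla")))

def available_institution_rows_py_alt (rows : List (List (String × String))) (include_unknown : Bool) (query : String) : List (List (String × String)) :=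
  let normalized_query := PySem.Str.strip (PySem.Str.lower query)
  rows.filter (pvKeep include_unknown normalized_query)

-- ===== PRECONDITION & SPEC =====
def Spec_available_institution_rows_py (rows : List (List (String × String))) (include_unknown : Bool) (query : String) (out : List (List (String × String))) : Prop := out = available_institution_rows_py_alt rows include_unknown query
instance (rows : List (List (String × String))) (include_unknown : Bool) (query : String) (out : List (List (String × String))) : Decidable (Spec_available_institution_rows_py rows include_unknown query out) := by unfold Spec_available_institution_rows_py; infer_instance

-- ===== CLAIM (what is proved, stated in full; the proofs are below) =====
def Claim_equal_available_institution_rows_py : Prop := ∀ (rows : List (List (String × String))) (include_unknown : Bool) (query : String), Dom_available_institution_rows_py rows include_unknown query → Spec_available_institution_rows_py rows include_unknown query (available_institution_rows_py rows include_unknown query)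

-- ===== LEMMAS AND PROOFS =====

theorem pv_main (rows : List (List (String × String))) (include_unknown : Bool) (query : String) :
    available_institution_rows_py rows include_unknown query
      = available_institution_rows_py_alt rows include_unknown query := by
  unfold available_institution_rows_py available_institution_rows_py_alt pvFilterRows pvKnownInstitutionRows
  set nq := PySem.Str.strip (PySem.Str.lower query) with hnq
  simp only [PySem.List.foldl_append_if_eq_filter, List.nil_append, List.map_id_fun', id]
  by_cases h : nq = "" <;> cases include_unknown <;> simp only [h, if_pos, ite_false]
  · exact List.filter_congr (fun row _ => by simp [pvKeep, pvIsUnknownInstitution])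
  · exact ((List.filter_true rows).symm).trans
      (List.filter_congr (fun row _ => by simp [pvKeep]))
  all_goals have hb : (nq == "") = false := beq_eq_false_iff_ne.mpr h
  · refine (List.filter_filter ..).trans (List.filter_congr (fun row _ => ?_))
    simp [pvKeep, pvIsUnknownInstitution, hb, Bool.and_comm]
  · exact List.filter_congr (fun row _ => by simp [pvKeep, hb])

-- ===== VERDICT (by name: the statement is the Claim_ definition above) =====
theorem available_institution_rows_py_spec : Claim_equal_available_institution_rows_py := by
  intro rows iu q _
  exact pv_main rows iu q
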